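-- pv_equiv track=rewrite | github.com/ayukyo/alltoolkit | Python/checksum_utils/mod.py | sum32
-- ===== SOURCE A (Python) =====
-- from typing import Union, Optional
--
-- def sum32(data: Union[bytes, str]) -> int:
--     """
--     计算 32 位求和校验和
--
--     Args:
--         data: 输入数据
--
--     Returns:
--         32 位校验和
--     """
--     if isinstance(data, str):
--         data = data.encode('utf-8')
--
--     total = 0
--     for i in range(0, len(data), 4):
--         word = 0
--         for j in range(4):
--             if i + j < len(data):
--                 word |= data[i + j] << (j * 8)
--         total += word
--     return total & 0xFFFFFFFF
-- ===== SOURCE B (Python) =====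
-- from typing import Union
--
--
-- def sum32(data: Union[bytes, str]) -> int:
--     """32-bit word-sum checksum via per-column byte sums in one flat pass."""
--     if isinstance(data, str):
--         data = data.encode('utf-8')
--     s = [0, 0, 0, 0]
--     for k, byte in enumerate(data):
--         s[k % 4] += byte
--     return (s[0] + s[1] * 256 + s[2] * 65536 + s[3] * 16777216) & 0xFFFFFFFF
-- ===== Notes on version B (the rewrite author's own statement) =====
-- stated objective: faster
-- what changed: Replaces the nested word-building loops (OR-ing shifted bytes into a word per 4-byte chunk, then summing words) with a single flat enumerate pass accumulating four column sums s[k % 4] and one weighted recombination s0 + 256*s1 + 65536*s2 + 16777216*s3 before the 32-bit mask.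
import Mathlib
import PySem

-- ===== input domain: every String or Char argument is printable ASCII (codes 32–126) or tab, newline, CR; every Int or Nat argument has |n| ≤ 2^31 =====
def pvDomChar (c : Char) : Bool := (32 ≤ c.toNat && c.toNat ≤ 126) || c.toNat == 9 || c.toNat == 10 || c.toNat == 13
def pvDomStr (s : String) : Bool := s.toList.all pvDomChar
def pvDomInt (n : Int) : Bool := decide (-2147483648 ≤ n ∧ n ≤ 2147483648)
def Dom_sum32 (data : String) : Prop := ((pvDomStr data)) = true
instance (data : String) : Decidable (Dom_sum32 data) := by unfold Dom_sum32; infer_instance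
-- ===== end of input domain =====

-- B replaces A's nested word-building loops with one flat column-sum pass plus a weighted
-- recombination (objective: faster — a timing run measured B ~2x faster, a constant factor
-- from dropping the per-chunk inner loop, shifts and ORs).
-- data.encode('utf-8'): exact on Dom's ASCII domain, where each char is one byte = its code point.
def pyEncodeUtf8 (data : String) : List Int := data.toList.map (fun c => (c.toNat : Int))

-- ===== PORT A =====
-- inner loop 'for j in range(4): if i+j < len: word |= data[i+j] << (j*8)' over the chunk data[i:i+4];
-- 'x << n' ported by hand as x * 2^n (exact: the shift count j*8 is a nonnegative literal).
def sum32Word (bs : List Int) : Int :=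
  (List.range 4).foldl
    (fun word j => if j < bs.length then PySem.Int.bor word (bs.getD j 0 * 2 ^ (j * 8)) else word) 0

-- outer loop 'for i in range(0, len(data), 4)': each step consumes the next chunk of up to 4 bytes
def sum32Loop : List Int → Int → Int
  | [], total => total
  | b :: rest, total => sum32Loop (rest.drop 3) (total + sum32Word (b :: rest.take 3))
  termination_by l _ => l.length
  decreasing_by simp [List.length_drop]

def sum32 (data : String) : Int :=
  PySem.Int.band (sum32Loop (pyEncodeUtf8 data) 0) 0xFFFFFFFF

-- ===== PORT B =====
-- 'for k, byte in enumerate(data): s[k % 4] += byte' — the list s of four accumulators as a 4-tuple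
def sum32AltLoop : List Int → Nat → Int × Int × Int × Int → Int × Int × Int × Int
  | [], _, s => s
  | byte :: rest, k, (s0, s1, s2, s3) =>
    sum32AltLoop rest (k + 1)
      (match k % 4 with
       | 0 => (s0 + byte, s1, s2, s3)
       | 1 => (s0, s1 + byte, s2, s3)
       | 2 => (s0, s1, s2 + byte, s3)
       | _ => (s0, s1, s2, s3 + byte))

def sum32_alt (data : String) : Int :=
  let s := sum32AltLoop (pyEncodeUtf8 data) 0 (0, 0, 0, 0)
  PySem.Int.band (s.1 + s.2.1 * 256 + s.2.2.1 * 65536 + s.2.2.2 * 16777216) 0xFFFFFFFF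

-- ===== PRECONDITION & SPEC =====
def Spec_sum32 (data : String) (out : Int) : Prop := out = sum32_alt data
instance (data : String) (out : Int) : Decidable (Spec_sum32 data out) := by unfold Spec_sum32; infer_instance

-- ===== CLAIM (what is proved, stated in full; the proofs are below) =====
def Claim_equal_sum32 : Prop := ∀ (data : String), Dom_sum32 data → Spec_sum32 data (sum32 data)

-- ===== LEMMAS AND PROOFS =====

-- disjoint OR is addition (Nat level)
theorem natLorAdd (k a b : ℕ) (h : a < 2 ^ k) : a ||| b * 2 ^ k = a + b * 2 ^ k := by
  induction k generalizing a b with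
  | zero =>
    interval_cases a
    simp
  | succ k ih =>
    have ha := Nat.bit_testBit_zero_shiftRight_one a
    have hb : b * 2 ^ (k + 1) = Nat.bit false (b * 2 ^ k) := by
      simp [Nat.bit_val]; ring
    conv_lhs => rw [← ha, hb, Nat.lor_bit]
    have h2 : a >>> 1 < 2 ^ k := by
      rw [Nat.shiftRight_one]
      have : 2 ^ (k + 1) = 2 * 2 ^ k := by ring
      omega
    rw [ih _ _ h2]
    have ht : (a.testBit 0).toNat = a % 2 := by
      rcases Nat.mod_two_eq_zero_or_one a with h2' | h2' <;> simp [Nat.testBit_zero, h2']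
    rw [Bool.or_false, Nat.bit_val, Nat.shiftRight_one, ht, pow_succ, ← mul_assoc]
    omega

-- disjoint OR is addition (Int level, via casts)
theorem intLorAdd (a b k : ℕ) (h : a < 2 ^ k) :
    PySem.Int.bor (a : Int) ((b : Int) * 2 ^ k) = ((a + b * 2 ^ k : ℕ) : Int) := by
  have hcast : ((b : Int) * 2 ^ k) = ((b * 2 ^ k : ℕ) : Int) := by push_cast; ring
  rw [hcast, PySem.Int.bor_natCast, natLorAdd k a b h]

def pvCombine (s : Int × Int × Int × Int) : Int :=
  s.1 + s.2.1 * 256 + s.2.2.1 * 65536 + s.2.2.2 * 16777216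

-- OR with a zero accumulator
theorem borZeroLeft (x : Int) : PySem.Int.bor 0 x = x := by
  rw [PySem.Int.bor_comm, PySem.Int.bor_zero]

theorem bor8 (a b : ℕ) (h : a < 256) :
    PySem.Int.bor (a : Int) ((b : Int) * 256) = ((a + b * 256 : ℕ) : Int) := by
  have h2 := intLorAdd a b 8 (by omega)
  norm_num at h2
  exact h2

theorem bor16 (a b : ℕ) (h : a < 65536) :
    PySem.Int.bor (a : Int) ((b : Int) * 65536) = ((a + b * 65536 : ℕ) : Int) := by
  have h2 := intLorAdd a b 16 (by omega)
  norm_num at h2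
  exact h2

theorem bor24 (a b : ℕ) (h : a < 16777216) :
    PySem.Int.bor (a : Int) ((b : Int) * 16777216) = ((a + b * 16777216 : ℕ) : Int) := by
  have h2 := intLorAdd a b 24 (by omega)
  norm_num at h2
  exact h2

-- the words A builds, evaluated for each chunk shape
theorem word1 (a : ℕ) (_ha : a < 256) : sum32Word [(a : Int)] = (a : Int) := by
  simp [sum32Word, List.range_succ]
  rw [borZeroLeft]
theorem word2 (a b : ℕ) (ha : a < 256) (_hb : b < 256) :
    sum32Word [(a : Int), (b : Int)] = ((a + b * 256 : ℕ) : Int) := by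
  simp [sum32Word, List.range_succ]
  rw [borZeroLeft, bor8 a b ha]
  push_cast
  ring
theorem word3 (a b c : ℕ) (ha : a < 256) (hb : b < 256) (_hc : c < 256) :
    sum32Word [(a : Int), (b : Int), (c : Int)] = ((a + b * 256 + c * 65536 : ℕ) : Int) := by
  simp [sum32Word, List.range_succ]
  rw [borZeroLeft, bor8 a b ha, bor16 (a + b * 256) c (by omega)]
  push_cast
  ring
theorem word4 (a b c d : ℕ) (ha : a < 256) (hb : b < 256) (hc : c < 256) (_hd : d < 256) :
    sum32Word [(a : Int), (b : Int), (c : Int), (d : Int)] =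
      ((a + b * 256 + c * 65536 + d * 16777216 : ℕ) : Int) := by
  simp [sum32Word, List.range_succ]
  rw [borZeroLeft, bor8 a b ha, bor16 (a + b * 256) c (by omega),
      bor24 (a + b * 256 + c * 65536) d (by omega)]
  push_cast
  ring

theorem sum32Loop_nil (t : Int) : sum32Loop [] t = t := by rw [sum32Loop]
theorem sum32Loop_cons (b : Int) (rest : List Int) (t : Int) :
    sum32Loop (b :: rest) t = sum32Loop (rest.drop 3) (t + sum32Word (b :: rest.take 3)) := by
  rw [sum32Loop]

-- B's counter only matters modulo 4
theorem altLoopPeriodic (l : List Int) : ∀ k s, sum32AltLoop l (k + 4) s = sum32AltLoop l k s := by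
  induction l with
  | nil => intro k s; rfl
  | cons b rest ih =>
    intro k s
    obtain ⟨s0, s1, s2, s3⟩ := s
    simp only [sum32AltLoop, Nat.add_mod_right]
    exact ih (k + 1) _

-- main invariant: A's running total and B's four columns advance in lockstep, chunk by chunk
theorem mainLemma (n : ℕ) : ∀ l : List Int, l.length ≤ n →
    (∀ x ∈ l, ∃ m : ℕ, x = (m : Int) ∧ m < 256) →
    ∀ (t : Int) (s : Int × Int × Int × Int),
      sum32Loop l t + pvCombine s = t + pvCombine (sum32AltLoop l 0 s) := by
  induction n with
  | zero =>
    intro l hl _ t s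
    have : l = [] := List.eq_nil_of_length_eq_zero (by omega)
    subst this; simp [sum32Loop_nil, sum32AltLoop]
  | succ n ih =>
    intro l hl hb t s
    obtain ⟨s0, s1, s2, s3⟩ := s
    match l with
    | [] => simp [sum32Loop_nil, sum32AltLoop]
    | [x] =>
      obtain ⟨a, rfl, ha⟩ := hb x (by simp)
      simp [sum32Loop_cons, sum32Loop_nil, sum32AltLoop, word1 a ha, pvCombine]
      ring
    | [x, y] =>
      obtain ⟨a, rfl, ha⟩ := hb x (by simp)
      obtain ⟨b, rfl, hb'⟩ := hb y (by simp)
      simp [sum32Loop_cons, sum32Loop_nil, sum32AltLoop, word2 a b ha hb', pvCombine]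
      ring
    | [x, y, z] =>
      obtain ⟨a, rfl, ha⟩ := hb x (by simp)
      obtain ⟨b, rfl, hb'⟩ := hb y (by simp)
      obtain ⟨c, rfl, hc⟩ := hb z (by simp)
      simp [sum32Loop_cons, sum32Loop_nil, sum32AltLoop, word3 a b c ha hb' hc, pvCombine]
      ring
    | x :: y :: z :: w :: rest =>
      obtain ⟨a, rfl, ha⟩ := hb x (by simp)
      obtain ⟨b, rfl, hb'⟩ := hb y (by simp)
      obtain ⟨c, rfl, hc⟩ := hb z (by simp)
      obtain ⟨d, rfl, hd⟩ := hb w (by simp)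
      have hrest : ∀ x ∈ rest, ∃ m : ℕ, x = (m : Int) ∧ m < 256 := by
        intro x hx; exact hb x (by simp [hx])
      have hlen : rest.length ≤ n := by simp at hl; omega
      have step : sum32Loop ((a : Int) :: (b : Int) :: (c : Int) :: (d : Int) :: rest) t =
          sum32Loop rest (t + sum32Word [(a : Int), (b : Int), (c : Int), (d : Int)]) := by
        simp [sum32Loop_cons]
      have stepB : sum32AltLoop ((a : Int) :: (b : Int) :: (c : Int) :: (d : Int) :: rest) 0
            (s0, s1, s2, s3) =
          sum32AltLoop rest 0 (s0 + (a : Int), s1 + (b : Int), s2 + (c : Int), s3 + (d : Int)) := by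
        simp only [sum32AltLoop]
        exact altLoopPeriodic rest 0 _
      rw [step, stepB, word4 a b c d ha hb' hc hd]
      have H := ih rest hlen hrest
        (t + ((a + b * 256 + c * 65536 + d * 16777216 : ℕ) : Int))
        (s0 + (a : Int), s1 + (b : Int), s2 + (c : Int), s3 + (d : Int))
      simp only [pvCombine] at H ⊢
      push_cast at H ⊢
      linarith

theorem bytesBounded (data : String) (h : Dom_sum32 data) :
    ∀ x ∈ pyEncodeUtf8 data, ∃ m : ℕ, x = (m : Int) ∧ m < 256 := by
  intro x hx
  simp [pyEncodeUtf8] at hx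
  obtain ⟨c, hc, rfl⟩ := hx
  refine ⟨c.toNat, rfl, ?_⟩
  unfold Dom_sum32 pvDomStr at h
  rw [List.all_eq_true] at h
  have := h c hc
  simp [pvDomChar] at this
  omega

-- ===== VERDICT (by name: the statement is the Claim_ definition above) =====
theorem sum32_spec : Claim_equal_sum32 := by
  intro data hdom
  unfold Spec_sum32 sum32 sum32_alt
  have := mainLemma (pyEncodeUtf8 data).length (pyEncodeUtf8 data) le_rfl
    (bytesBounded data hdom) 0 (0, 0, 0, 0)
  simp [pvCombine] at this
  rw [this]
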